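-- pv_equiv track=rewrite | github.com/YuFudan/JDL | mxl/get_wave_data.py | cum
-- ===== SOURCE A (Python) =====
-- from collections import Counter
--
-- def cum(ts, for_plot=False):
--     """
--     将一堆事件的发生时间统计为[(t, 累积发生次数)]的形式
--     """
--     num0 = len([t for t in ts if t <= 0])
--     t_nums = sorted(list(Counter([t for t in ts if t > 0]).items()), key=lambda x:x[0])
--     if for_plot:
--         points = [(0, num0)]
--     else:
--         points = []
--     cnt = num0
--     for t, n in t_nums:
--         if for_plot:
--             points.append((t, cnt))
--         cnt += n
--         points.append((t, cnt))
--     return points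
-- ===== SOURCE B (Python) =====
-- def cum(ts, for_plot=False):
--     """Positional reformulation: in the sorted array of positive times, the
--     cumulative count at the end of a group IS (number of non-positive times)
--     + (index one past the group), so the counts are read off group-boundary
--     indices directly -- no Counter and no running accumulator."""
--     pos = sorted(t for t in ts if t > 0)
--     num0 = len(ts) - len(pos)
--     starts = [j for j, t in enumerate(pos) if j == 0 or pos[j - 1] != t]
--     points = [(0, num0)] if for_plot else []
--     for s, e in zip(starts, starts[1:] + [len(pos)]):
--         if for_plot:
--             points.append((pos[s], num0 + s))
--         points.append((pos[s], num0 + e))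
--     return points
-- ===== Notes on version B (the rewrite author's own statement) =====
-- stated objective: alternative
-- what changed: B replaces A's Counter-plus-running-accumulator with a positional computation: it sorts the raw positive times, finds group-start indices with one adjacent-inequality scan, and reads every cumulative count directly off the boundary index (num0 + index) via zip of consecutive boundaries, never materializing a multiplicity map or a running sum.
import Mathlib
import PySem

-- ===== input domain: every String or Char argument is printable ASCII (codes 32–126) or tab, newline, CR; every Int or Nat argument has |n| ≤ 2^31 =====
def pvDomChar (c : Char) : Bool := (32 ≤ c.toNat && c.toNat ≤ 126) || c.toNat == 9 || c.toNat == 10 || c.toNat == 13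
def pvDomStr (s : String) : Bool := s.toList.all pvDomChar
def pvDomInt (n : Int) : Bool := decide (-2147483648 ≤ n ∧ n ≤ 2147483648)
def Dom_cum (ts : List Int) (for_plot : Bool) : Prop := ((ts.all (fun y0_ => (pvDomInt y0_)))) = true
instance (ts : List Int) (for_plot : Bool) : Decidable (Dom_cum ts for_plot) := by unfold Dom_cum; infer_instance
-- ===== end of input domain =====

-- B computes every cumulative count positionally (num0 + boundary index in the sorted
-- positives, groups found by one adjacent-inequality scan) instead of A's
-- Counter-items-then-running-sum; an alternative decomposition of the same O(n log n) task.

-- ===== PORT A =====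
def cum (ts : List Int) (for_plot : Bool) : List (Int × Int) :=
  let num0 : Int := ((ts.filter (fun t => decide (t ≤ 0))).length : Int)
  let t_nums : List (Int × Int) :=
    PySem.List.sorted ((PySem.Dict.counter (ts.filter (fun t => decide (0 < t)))).items)
      (fun x => x.1) false
  let points : List (Int × Int) := if for_plot then [(0, num0)] else []
  (t_nums.foldl (fun (st : List (Int × Int) × Int) tn =>
      let points := if for_plot then st.1 ++ [(tn.1, st.2)] else st.1
      let cnt := st.2 + tn.2
      (points ++ [(tn.1, cnt)], cnt)) (points, num0)).1

-- ===== PORT B =====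
-- indices pos[s] / pos[j-1] are in range by construction (s, j come from enumerate),
-- so pyGetD with default 0 is exact there
def cum_alt (ts : List Int) (for_plot : Bool) : List (Int × Int) :=
  let pos := PySem.List.sorted (ts.filter (fun t => decide (0 < t))) (fun x => x) false
  let num0 : Int := (ts.length : Int) - (pos.length : Int)
  let starts : List Int :=
    ((PySem.List.enumerate pos).filter
      (fun p => p.1 == 0 || !(PySem.List.pyGetD pos (p.1 - 1) 0 == p.2))).map Prod.fst
  let points : List (Int × Int) := if for_plot then [(0, num0)] else []
  (List.zip starts (PySem.List.slice starts (some 1) none ++ [(pos.length : Int)])).foldl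
    (fun acc se =>
      let acc := if for_plot then acc ++ [(PySem.List.pyGetD pos se.1 0, num0 + se.1)] else acc
      acc ++ [(PySem.List.pyGetD pos se.1 0, num0 + se.2)]) points

-- ===== PRECONDITION & SPEC =====
def Spec_cum (ts : List Int) (for_plot : Bool) (out : List (Int × Int)) : Prop := out = cum_alt ts for_plot
instance (ts : List Int) (for_plot : Bool) (out : List (Int × Int)) : Decidable (Spec_cum ts for_plot out) := by unfold Spec_cum; infer_instance

-- ===== CLAIM (what is proved, stated in full; the proofs are below) =====
def Claim_equal_cum : Prop := ∀ (ts : List Int) (for_plot : Bool), Dom_cum ts for_plot → Spec_cum ts for_plot (cum ts for_plot)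

-- ===== LEMMAS AND PROOFS =====

-- A's loop body, extracted as a recursion emitting the points directly
def agoA (l : List (Int × Int)) (cnt : Int) (fp : Bool) : List (Int × Int) :=
  match l with
  | [] => []
  | (t, n) :: rest =>
    (if fp then [(t, cnt)] else []) ++ (t, cnt + n) :: agoA rest (cnt + n) fp

lemma foldA_eq (fp : Bool) : ∀ (l : List (Int × Int)) (init : List (Int × Int)) (cnt : Int),
    (l.foldl (fun (st : List (Int × Int) × Int) tn =>
      let points := if fp then st.1 ++ [(tn.1, st.2)] else st.1
      let cnt := st.2 + tn.2
      (points ++ [(tn.1, cnt)], cnt)) (init, cnt)).1 = init ++ agoA l cnt fp := by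
  intro l
  induction l with
  | nil => intro init cnt; simp [agoA]
  | cons hd tl ih =>
    intro init cnt
    obtain ⟨t, n⟩ := hd
    simp only [List.foldl_cons, agoA, ih]
    cases fp <;> simp

-- the canonical group-boundary recursion both programs are reduced to
def cumAltGo (pos : List Int) (cnt : Int) (for_plot : Bool) : List (Int × Int) :=
  match pos with
  | [] => []
  | t :: rest =>
    let k : Int := 1 + ((rest.takeWhile (fun x => x == t)).length : Int)
    (if for_plot then [(t, cnt)] else []) ++
      (t, cnt + k) :: cumAltGo (rest.dropWhile (fun x => x == t)) (cnt + k) for_plot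
termination_by pos.length
decreasing_by
  have := List.length_dropWhile_le (p := fun x => x == t) (l := rest)
  simp; omega

-- the (time, multiplicity) pairs of consecutive equal-element groups
def groupPairs (l : List Int) : List (Int × Int) :=
  match l with
  | [] => []
  | t :: rest =>
    (t, 1 + ((rest.takeWhile (fun x => x == t)).length : Int)) ::
      groupPairs (rest.dropWhile (fun x => x == t))
termination_by l.length
decreasing_by
  have := List.length_dropWhile_le (p := fun x => x == t) (l := rest)
  simp; omega

lemma agoA_groupPairs (fp : Bool) : ∀ (l : List Int) (cnt : Int),
    agoA (groupPairs l) cnt fp = cumAltGo l cnt fp := by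
  intro l
  induction l using groupPairs.induct with
  | case1 => intro cnt; simp [groupPairs, agoA, cumAltGo]
  | case2 t rest ih =>
    intro cnt
    rw [groupPairs, cumAltGo, agoA, ih]

lemma mem_groupPairs_fst : ∀ (l : List Int) (p : Int × Int), p ∈ groupPairs l → p.1 ∈ l := by
  intro l
  induction l using groupPairs.induct with
  | case1 => simp [groupPairs]
  | case2 t rest ih =>
    intro p hp
    rw [groupPairs] at hp
    rcases List.mem_cons.1 hp with h | h
    · subst h; simp
    · have := ih p h
      have hsub : (rest.dropWhile (fun x => x == t)).Sublist rest := List.dropWhile_sublist _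
      exact List.mem_cons_of_mem _ (hsub.mem this)

lemma dropWhile_ne (t : Int) : ∀ (l : List Int), l.Pairwise (· ≤ ·) → (∀ x ∈ l, t ≤ x) →
    ∀ x ∈ l.dropWhile (fun x => x == t), t < x := by
  intro l
  induction l with
  | nil => simp
  | cons a l' ih =>
    intro hp hge
    by_cases ha : a = t
    · subst ha
      rw [List.dropWhile_cons_of_pos (by simp)]
      exact ih (List.Pairwise.sublist (List.sublist_cons_self _ _) hp) (fun x hx => hge x (List.mem_cons_of_mem _ hx))
    · rw [List.dropWhile_cons_of_neg (by simpa using ha)]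
      intro x hx
      have hta : t < a := lt_of_le_of_ne (hge a (List.mem_cons_self)) (Ne.symm ha)
      rcases List.mem_cons.1 hx with h | h
      · omega
      · have := (List.pairwise_cons.1 hp).1 x h
        omega

lemma takeWhile_all_eq (t : Int) (l : List Int) : ∀ x ∈ l.takeWhile (fun x => x == t), x = t := by
  intro x hx
  simpa using List.mem_takeWhile_imp hx

lemma count_takeWhile (t : Int) (l : List Int) :
    (l.takeWhile (fun x => x == t)).count t = (l.takeWhile (fun x => x == t)).length := by
  rw [List.count_eq_length]
  intro b hb
  exact (takeWhile_all_eq t l b hb).symm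

-- groupPairs of a sorted list is a permutation of Counter-style items
lemma groupPairs_perm : ∀ (l : List Int), l.Pairwise (· ≤ ·) →
    (groupPairs l).Perm ((PySem.Set.ofList l).map (fun k => (k, (l.count k : Int)))) := by
  intro l
  induction l using groupPairs.induct with
  | case1 => intro _; simp [groupPairs]
  | case2 t rest ih =>
    intro hp
    set tw := rest.takeWhile (fun x => x == t) with htw
    set d := rest.dropWhile (fun x => x == t) with hd
    have hrest : tw ++ d = rest := List.takeWhile_append_dropWhile
    have hgeRest : ∀ x ∈ rest, t ≤ x := fun x hx => (List.pairwise_cons.1 hp).1 x hx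
    have hpRest : rest.Pairwise (· ≤ ·) := (List.pairwise_cons.1 hp).2
    have hdlt : ∀ x ∈ d, t < x := dropWhile_ne t rest hpRest hgeRest
    have hpd : d.Pairwise (· ≤ ·) := List.Pairwise.sublist (List.dropWhile_sublist _) hpRest
    have htnd : t ∉ d := fun h => lt_irrefl t (hdlt t h)
    have hcount_t : ((t :: rest).count t : Int) = 1 + (tw.length : Int) := by
      rw [List.count_cons_self, ← hrest, List.count_append, count_takeWhile,
        List.count_eq_zero.2 htnd]
      push_cast; ring
    have hcount_d : ∀ x ∈ d, (t :: rest).count x = d.count x := by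
      intro x hx
      have hxt : x ≠ t := fun h => lt_irrefl t (h ▸ hdlt x hx)
      have htx : t ≠ x := Ne.symm hxt
      have h1 : tw.count x = 0 :=
        List.count_eq_zero.2 (fun hmem => hxt (takeWhile_all_eq t rest x hmem))
      rw [← hrest]
      simp [List.count_append, h1, htx]
    have hsetperm : (PySem.Set.ofList (t :: rest)).Perm (t :: PySem.Set.ofList d) := by
      rw [List.perm_ext_iff_of_nodup (PySem.Set.nodup_ofList _)]
      · intro a
        rw [PySem.Set.mem_ofList]
        simp only [List.mem_cons, PySem.Set.mem_ofList]
        constructor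
        · rintro (rfl | ha)
          · exact Or.inl rfl
          · rw [← hrest] at ha
            rcases List.mem_append.1 ha with h | h
            · exact Or.inl (takeWhile_all_eq t rest a h)
            · exact Or.inr h
        · rintro (rfl | ha)
          · exact Or.inl rfl
          · right
            rw [← hrest]
            exact List.mem_append.2 (Or.inr ha)
      · exact List.Nodup.cons (fun h => htnd ((PySem.Set.mem_ofList _ _).1 h))
          (PySem.Set.nodup_ofList _)
    rw [groupPairs]
    have hmapcongr : (PySem.Set.ofList d).map (fun k => (k, ((t :: rest).count k : Int)))
        = (PySem.Set.ofList d).map (fun k => (k, (d.count k : Int))) := by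
      apply List.map_congr_left
      intro a ha
      rw [hcount_d a ((PySem.Set.mem_ofList _ _).1 ha)]
    refine List.Perm.trans (List.Perm.cons _ (ih hpd)) ?_
    have hstep : ((t, 1 + (tw.length : Int)) ::
          (PySem.Set.ofList d).map (fun k => (k, (d.count k : Int))))
        = (t :: PySem.Set.ofList d).map (fun k => (k, ((t :: rest).count k : Int))) := by
      rw [List.map_cons, hcount_t, hmapcongr]
    rw [hstep]
    exact (hsetperm.map _).symm

lemma groupPairs_pairwise : ∀ (l : List Int), l.Pairwise (· ≤ ·) →
    (groupPairs l).Pairwise (fun a b => a.1 < b.1) := by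
  intro l
  induction l using groupPairs.induct with
  | case1 => intro _; simp [groupPairs]
  | case2 t rest ih =>
    intro hp
    have hgeRest : ∀ x ∈ rest, t ≤ x := fun x hx => (List.pairwise_cons.1 hp).1 x hx
    have hpRest : rest.Pairwise (· ≤ ·) := (List.pairwise_cons.1 hp).2
    have hdlt := dropWhile_ne t rest hpRest hgeRest
    have hpd : (rest.dropWhile (fun x => x == t)).Pairwise (· ≤ ·) :=
      List.Pairwise.sublist (List.dropWhile_sublist _) hpRest
    rw [groupPairs]
    refine List.pairwise_cons.2 ⟨?_, ih hpd⟩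
    intro p hpmem
    exact hdlt p.1 (mem_groupPairs_fst _ p hpmem)

-- A's sorted Counter items ARE the groups of the sorted positives
lemma sorted_counter_items_eq_groupPairs (l : List Int) :
    PySem.List.sorted ((PySem.Dict.counter l).items) (fun x => x.1) false
      = groupPairs (PySem.List.sorted l (fun x => x) false) := by
  set s := PySem.List.sorted l (fun x => x) false with hs
  have hperm : s.Perm l := PySem.List.sorted_perm l _ _
  have hpair : s.Pairwise (· ≤ ·) := by
    have := PySem.List.sorted_pairwise l (fun x => x)
    simpa using this
  apply PySem.List.sorted_eq_of_perm_of_pairwise_lt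
  · rw [PySem.Dict.items_counter]
    refine (groupPairs_perm s hpair).trans ?_
    have hcnt : (fun k => (k, (s.count k : Int))) = (fun k => (k, (l.count k : Int))) := by
      funext k; rw [hperm.count_eq]
    rw [hcnt]
    refine List.Perm.map _ ?_
    rw [List.perm_ext_iff_of_nodup (PySem.Set.nodup_ofList _) (PySem.Set.nodup_ofList _)]
    intro a
    simp only [PySem.Set.mem_ofList]
    exact hperm.mem_iff
  · exact groupPairs_pairwise s hpair

-- the two programs' starting counts agree
lemma num0_eq (ts : List Int) :
    ((ts.filter (fun t => decide (t ≤ 0))).length : Int)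
      = (ts.length : Int) - ((ts.filter (fun t => decide (0 < t))).length : Int) := by
  have h : (ts.filter (fun t => decide (t ≤ 0))).length
      + (ts.filter (fun t => decide (0 < t))).length = ts.length := by
    induction ts with
    | nil => simp
    | cons a l ih =>
      by_cases ha : a ≤ 0
      · rw [List.filter_cons_of_pos (by simpa using ha),
          List.filter_cons_of_neg (by simpa using ha)]
        simp; omega
      · rw [List.filter_cons_of_neg (by simpa using ha),
          List.filter_cons_of_pos (by simpa using ha)]
        simp; omega
  omega

-- ============ B-side lemmas ============

-- B's fold rewritten as init ++ flatMap
lemma foldB_eq (fp : Bool) (f g : Int × Int → Int × Int) :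
    ∀ (l : List (Int × Int)) (init : List (Int × Int)),
    l.foldl (fun acc se => (if fp then acc ++ [f se] else acc) ++ [g se]) init
      = init ++ l.flatMap (fun se => (if fp then [f se] else []) ++ [g se]) := by
  intro l
  induction l with
  | nil => intro init; simp
  | cons hd tl ih =>
    intro init
    simp only [List.foldl_cons, List.flatMap_cons, ih]
    cases fp <;> simp

-- group-start indices of consecutive equal-element groups, recursively
def startsR (l : List Int) : List Nat :=
  match l with
  | [] => []
  | t :: rest =>
    0 :: (startsR (rest.dropWhile (fun x => x == t))).map
          (fun k => k + (1 + (rest.takeWhile (fun x => x == t)).length))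
termination_by l.length
decreasing_by
  have := List.length_dropWhile_le (p := fun x => x == t) (l := rest)
  simp; omega

-- head of a dropWhile-(== t) residue differs from t
lemma dropWhile_head_ne (t : Int) :
    ∀ (l : List Int) (h : 0 < (l.dropWhile (fun x => x == t)).length),
      (l.dropWhile (fun x => x == t))[0]'h ≠ t := by
  intro l
  induction l with
  | nil => simp
  | cons a l' ih =>
    by_cases ha : a = t
    · rw [List.dropWhile_cons_of_pos (by simp [ha])]; exact ih
    · rw [List.dropWhile_cons_of_neg (by simpa using ha)]
      intro _; simpa using ha

lemma enumerate_shift {α : Type} (xs : List α) : ∀ (m : Int),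
    PySem.List.enumerate xs m = (PySem.List.enumerate xs 0).map (fun p => (p.1 + m, p.2)) := by
  induction xs with
  | nil => intro m; simp [PySem.List.enumerate_nil]
  | cons x xs ih =>
    intro m
    rw [PySem.List.enumerate_cons, PySem.List.enumerate_cons, ih (m + 1),
      show (0 : Int) + 1 = 1 from rfl, ih 1, List.map_cons, List.map_map]
    refine congrArg₂ _ (by simp) ?_
    apply List.map_congr_left
    intro p _
    simp [Function.comp]
    ring

-- elements of the initial equal run, by position
lemma run_getD_eq (t : Int) (rest : List Int) (k : Nat)
    (hk : k < (rest.takeWhile (fun x => x == t)).length + 1) :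
    (t :: rest).getD k 0 = t := by
  have hsplit : t :: rest = (t :: rest.takeWhile (fun x => x == t))
      ++ rest.dropWhile (fun x => x == t) := by
    rw [List.cons_append, List.takeWhile_append_dropWhile]
  rw [hsplit, List.getD_append _ _ _ _ (by simp; omega)]
  match k with
  | 0 => rfl
  | Nat.succ j =>
    have hj : j < (rest.takeWhile (fun x => x == t)).length := by omega
    rw [List.getD_cons_succ, List.getD_eq_getElem _ _ hj]
    exact takeWhile_all_eq t rest _ (List.getElem_mem hj)

-- B's enumerate-filter comprehension computes exactly the recursive group starts
lemma startsFilter_eq : ∀ (pos : List Int),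
    ((PySem.List.enumerate pos).filter
        (fun p => p.1 == 0 || !(PySem.List.pyGetD pos (p.1 - 1) 0 == p.2))).map Prod.fst
      = (startsR pos).map (fun (k : Nat) => (k : Int)) := by
  intro pos
  induction pos using groupPairs.induct with
  | case1 => simp [PySem.List.enumerate_nil, startsR]
  | case2 t rest ih =>
    set tw := rest.takeWhile (fun x => x == t) with htw
    set d := rest.dropWhile (fun x => x == t) with hd
    have hrest : tw ++ d = rest := List.takeWhile_append_dropWhile
    have htwle : tw.length + d.length = rest.length := by rw [← hrest]; simp
    have htake : (List.takeWhile (fun x => x == t) rest).length = tw.length := by rw [htw]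
    have hdrop : (List.dropWhile (fun x => x == t) rest).length = d.length := by rw [hd]
    have e1 : PySem.List.enumerate (t :: rest) 0
        = (0, t) :: (PySem.List.enumerate tw 1
            ++ PySem.List.enumerate d (1 + (tw.length : Int))) := by
      rw [PySem.List.enumerate_cons, ← hrest, PySem.List.enumerate_append]
      norm_num
    have e2 : (PySem.List.enumerate tw 1).filter
        (fun p => p.1 == 0 || !(PySem.List.pyGetD (t :: rest) (p.1 - 1) 0 == p.2)) = [] := by
      rw [List.filter_eq_nil_iff]
      intro p hp
      obtain ⟨k, hk, rfl⟩ := (PySem.List.mem_enumerate_iff tw 1 p).1 hp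
      have h0 : (((1 : Int) + k) == 0) = false := by simp; omega
      have hidx : (1 : Int) + k - 1 = ((k : Nat) : Int) := by ring
      have hval : tw[k] = t := takeWhile_all_eq t rest _ (List.getElem_mem hk)
      simp only [h0, hidx, PySem.List.pyGetD_natCast, Bool.false_or, Bool.not_eq_true']
      rw [run_getD_eq t rest k (by omega), hval]
      simp
    have e3 : (PySem.List.enumerate d (1 + (tw.length : Int))).filter
        (fun p => p.1 == 0 || !(PySem.List.pyGetD (t :: rest) (p.1 - 1) 0 == p.2))
        = ((PySem.List.enumerate d 0).filter
            (fun p => p.1 == 0 || !(PySem.List.pyGetD d (p.1 - 1) 0 == p.2))).map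
              (fun p => (p.1 + (1 + (tw.length : Int)), p.2)) := by
      rw [enumerate_shift d (1 + (tw.length : Int)), List.filter_map]
      congr 1
      apply List.filter_congr
      intro p hp
      obtain ⟨k, hk, rfl⟩ := (PySem.List.mem_enumerate_iff d 0 p).1 hp
      simp only [Function.comp]
      have h0 : (((0 : Int) + k + (1 + (tw.length : Int))) == 0) = false := by simp; omega
      have hidx : (0 : Int) + k + (1 + (tw.length : Int)) - 1
          = ((k + tw.length : Nat) : Int) := by push_cast; ring
      rw [h0, hidx, PySem.List.pyGetD_natCast]
      match k, hk with
      | 0, hk =>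
        have hu : d[0]'hk ≠ t := dropWhile_head_ne t rest hk
        rw [show (0 + tw.length : Nat) = tw.length from by omega,
          run_getD_eq t rest tw.length (by omega)]
        simp [Ne.symm hu]
      | Nat.succ j, hk =>
        have hsplit : t :: rest = (t :: tw) ++ d := by
          rw [List.cons_append, hrest]
        rw [hsplit, List.getD_append_right _ _ _ _ (by simp only [List.length_cons]; omega),
          show j + 1 + tw.length - (t :: tw).length = j from by
            simp only [List.length_cons]; omega]
        have h02 : (((0 : Int) + ((j + 1 : Nat) : Int)) == 0) = false := by simp; omega
        have hidx2 : (0 : Int) + ((j + 1 : Nat) : Int) - 1 = ((j : Nat) : Int) := by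
          push_cast; ring
        rw [h02, hidx2, PySem.List.pyGetD_natCast]
    rw [e1, List.filter_cons_of_pos (by simp), List.filter_append, e2, e3, startsR]
    simp only [List.map_cons, List.nil_append, List.map_map]
    refine congrArg₂ _ rfl ?_
    rw [← hd, ← htw,
      show (Prod.fst ∘ fun (p : Int × Int) => (p.1 + (1 + (tw.length : Int)), p.2))
        = (fun (x : Int) => x + (1 + (tw.length : Int))) ∘ Prod.fst from rfl,
      ← List.map_map, ih, List.map_map]
    apply List.map_congr_left
    intro p _
    simp [Function.comp]

-- B's zip-of-boundaries emission IS the canonical group recursion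
lemma pairs_emit : ∀ (pos : List Int) (c : Int) (fp : Bool),
    (List.zip ((startsR pos).map (fun (k : Nat) => (k : Int)))
        (((startsR pos).map (fun (k : Nat) => (k : Int))).tail ++ [(pos.length : Int)])).flatMap
      (fun se => (if fp then [(PySem.List.pyGetD pos se.1 0, c + se.1)] else [])
          ++ [(PySem.List.pyGetD pos se.1 0, c + se.2)])
      = cumAltGo pos c fp := by
  intro pos
  induction pos using groupPairs.induct with
  | case1 => intro c fp; simp [startsR, cumAltGo]
  | case2 t rest ih =>
    intro c fp
    set tw := rest.takeWhile (fun x => x == t) with htw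
    set d := rest.dropWhile (fun x => x == t) with hd
    have hrest : tw ++ d = rest := List.takeWhile_append_dropWhile
    have htwle : tw.length + d.length = rest.length := by rw [← hrest]; simp
    have htake : (List.takeWhile (fun x => x == t) rest).length = tw.length := by rw [htw]
    have hdrop : (List.dropWhile (fun x => x == t) rest).length = d.length := by rw [hd]
    have hget0 : PySem.List.pyGetD (t :: rest) 0 0 = t := by
      simp [PySem.List.pyGetD, PySem.List.pyGet?, PySem.List.pyIdx?]
    have hlenpos : ((t :: rest).length : Int) = (d.length : Int) + (1 + (tw.length : Int)) := by
      rw [← hrest]; simp; ring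
    have hshiftget : ∀ (k : Nat),
        PySem.List.pyGetD (t :: rest) ((k : Int) + (1 + (tw.length : Int))) 0
          = PySem.List.pyGetD d ((k : Nat) : Int) 0 := by
      intro k
      have hsplit : t :: rest = (t :: tw) ++ d := by rw [List.cons_append, hrest]
      rw [show (k : Int) + (1 + (tw.length : Int)) = ((k + (1 + tw.length) : Nat) : Int) from
          by push_cast; ring,
        PySem.List.pyGetD_natCast, PySem.List.pyGetD_natCast, hsplit,
        List.getD_append_right _ _ _ _ (by simp; omega),
        show k + (1 + tw.length) - (t :: tw).length = k from by simp; omega]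
    have hSR : startsR (t :: rest)
        = 0 :: (startsR d).map (fun k => k + (1 + tw.length)) := by
      rw [startsR]
    have hcum : cumAltGo (t :: rest) c fp
        = (if fp then [(t, c)] else []) ++ (t, c + (1 + (tw.length : Int)))
            :: cumAltGo d (c + (1 + (tw.length : Int))) fp := by
      rw [cumAltGo]
    have hmapshift : (startsR (t :: rest)).map (fun (k : Nat) => (k : Int))
        = 0 :: ((startsR d).map (fun (k : Nat) => (k : Int))).map
            (fun x => x + (1 + (tw.length : Int))) := by
      rw [hSR, List.map_cons, List.map_map, List.map_map]
      refine congrArg₂ _ rfl ?_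
      apply List.map_congr_left
      intro p _
      simp [Function.comp]
    cases hdd : d with
    | nil =>
      rw [hmapshift, hdd, startsR]
      simp only [List.map_nil, List.tail_cons, List.nil_append, List.zip_cons_cons,
        List.zip_nil_right, List.flatMap_cons, List.flatMap_nil, List.append_nil]
      rw [hcum, hdd, cumAltGo, hget0,
        show ((t :: rest).length : Int) = 1 + (tw.length : Int) from by
          rw [hlenpos, hdd]; simp]
      all_goals (cases fp <;> simp)
    | cons u d' =>
      obtain ⟨T, hT⟩ : ∃ T, startsR d = 0 :: T := by rw [hdd, startsR]; exact ⟨_, rfl⟩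
      rw [hmapshift, hT]
      simp only [List.map_cons, List.tail_cons]
      rw [show ((((0 : Nat) : Int) + (1 + (tw.length : Int)))
              :: (T.map (fun (k : Nat) => (k : Int))).map (fun x => x + (1 + (tw.length : Int))))
            ++ [((t :: rest).length : Int)]
          = (((0 : Nat) : Int) + (1 + (tw.length : Int)))
              :: ((T.map (fun (k : Nat) => (k : Int))).map (fun x => x + (1 + (tw.length : Int)))
                  ++ [((t :: rest).length : Int)]) from rfl,
        List.zip_cons_cons, List.flatMap_cons]
      have hsecond : (T.map (fun (k : Nat) => (k : Int))).map (fun x => x + (1 + (tw.length : Int)))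
            ++ [((t :: rest).length : Int)]
          = (T.map (fun (k : Nat) => (k : Int)) ++ [(d.length : Int)]).map
              (fun x => x + (1 + (tw.length : Int))) := by
        rw [List.map_append, hlenpos]
        simp
      have hfirst : (((0 : Nat) : Int) + (1 + (tw.length : Int)))
              :: (T.map (fun (k : Nat) => (k : Int))).map (fun x => x + (1 + (tw.length : Int)))
          = ((((0 : Nat) : Int)) :: T.map (fun (k : Nat) => (k : Int))).map
              (fun x => x + (1 + (tw.length : Int))) := by
        simp
      rw [hsecond, hfirst, List.zip_map]
      have hflat : List.flatMap
            (fun se => (if fp then [(PySem.List.pyGetD (t :: rest) se.1 0, c + se.1)] else [])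
                ++ [(PySem.List.pyGetD (t :: rest) se.1 0, c + se.2)])
            (List.map (Prod.map (fun x => x + (1 + (tw.length : Int)))
                (fun x => x + (1 + (tw.length : Int))))
              (List.zip ((((0 : Nat) : Int)) :: T.map (fun (k : Nat) => (k : Int)))
                (T.map (fun (k : Nat) => (k : Int)) ++ [(d.length : Int)])))
          = List.flatMap
            (fun se => (if fp then
                  [(PySem.List.pyGetD d se.1 0, (c + (1 + (tw.length : Int))) + se.1)] else [])
                ++ [(PySem.List.pyGetD d se.1 0, (c + (1 + (tw.length : Int))) + se.2)])
            (List.zip ((((0 : Nat) : Int)) :: T.map (fun (k : Nat) => (k : Int)))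
              (T.map (fun (k : Nat) => (k : Int)) ++ [(d.length : Int)])) := by
        rw [List.flatMap_map]
        apply List.flatMap_congr
        intro se hse
        obtain ⟨k, hk⟩ : ∃ k : Nat, se.1 = ((k : Nat) : Int) := by
          have h1 : se.1 ∈ (((0 : Nat) : Int)) :: T.map (fun (k : Nat) => (k : Int)) :=
            (List.of_mem_zip hse).1
          rcases List.mem_cons.1 h1 with h | h
          · exact ⟨0, h⟩
          · obtain ⟨k, _, hkk⟩ := List.mem_map.1 h
            exact ⟨k, hkk.symm⟩
        simp only [Prod.map]
        rw [hk, hshiftget k,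
          show c + ((k : Int) + (1 + (tw.length : Int)))
            = c + (1 + (tw.length : Int)) + (k : Int) from by ring,
          show c + (se.2 + (1 + (tw.length : Int)))
            = c + (1 + (tw.length : Int)) + se.2 from by ring]
      rw [hflat]
      have hzip2 : List.zip ((((0 : Nat) : Int)) :: T.map (fun (k : Nat) => (k : Int)))
            (T.map (fun (k : Nat) => (k : Int)) ++ [(d.length : Int)])
          = List.zip ((startsR d).map (fun (k : Nat) => (k : Int)))
              (((startsR d).map (fun (k : Nat) => (k : Int))).tail ++ [(d.length : Int)]) := by
        rw [hT]; simp
      rw [hzip2, ih (c + (1 + (tw.length : Int))) fp, hcum]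
      all_goals (cases fp <;> simp [hget0])

-- ===== VERDICT (by name: the statement is the Claim_ definition above) =====
theorem cum_spec : Claim_equal_cum := by
  intro ts for_plot _
  show cum ts for_plot = cum_alt ts for_plot
  unfold cum cum_alt
  simp only
  rw [foldA_eq, sorted_counter_items_eq_groupPairs, agoA_groupPairs, startsFilter_eq,
    PySem.List.slice_from_one,
    foldB_eq for_plot
      (fun se => (PySem.List.pyGetD
          (PySem.List.sorted (ts.filter (fun t => decide (0 < t))) (fun x => x) false) se.1 0,
        ((ts.length : Int)
          - ((PySem.List.sorted (ts.filter (fun t => decide (0 < t))) (fun x => x) false).length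
              : Int)) + se.1))
      (fun se => (PySem.List.pyGetD
          (PySem.List.sorted (ts.filter (fun t => decide (0 < t))) (fun x => x) false) se.1 0,
        ((ts.length : Int)
          - ((PySem.List.sorted (ts.filter (fun t => decide (0 < t))) (fun x => x) false).length
              : Int)) + se.2))]
  rw [pairs_emit, PySem.List.length_sorted, ← num0_eq]
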